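-- pv_equiv track=rewrite | github.com/jutkko/learn | python/non-divisible-subset.py | get_sum_except_for_value
-- ===== SOURCE A (Python) =====
-- def get_sum_except_for_value(myMap, k):
--     result = 0
--     toExclude = []
--     for key, val in myMap.items():
--         if k - key != key and key not in toExclude:
--             toExclude.append(key)
--             toExclude.append(k - key)
--             otherValue = 0
--             if k - key in myMap:
--                 otherValue = myMap[k - key]
--             result += max(val, otherValue)
--
--     return result
-- ===== SOURCE B (Python) =====
-- def get_sum_except_for_value(myMap, k):
--     # Each complementary pair {key, k-key} contributes once, counted at its
--     # "winning" member: the key with the larger value (ties broken by the smaller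
--     # key); a key whose partner is absent contributes max(val, 0).
--     total = 0
--     for key, val in myMap.items():
--         other = k - key
--         if other == key:
--             continue
--         if other not in myMap:
--             total += max(val, 0)
--         else:
--             ov = myMap[other]
--             if val > ov or (val == ov and key < other):
--                 total += val
--     return total
-- ===== Notes on version B (the rewrite author's own statement) =====
-- stated objective: faster
-- what changed: Replaces A's dedup-by-exclusion-list scheme (charge each pair's max at the first member encountered, remembering both members in a growing toExclude list with an O(n) membership scan per key) by a memoryless single pass using symmetry breaking: every key decides locally whether it is its pair's winner (strictly larger value, ties going to the smaller key; absent partner counts as 0) and contributes its own value exactly then, so no exclusion structure exists at all.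
import Mathlib
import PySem

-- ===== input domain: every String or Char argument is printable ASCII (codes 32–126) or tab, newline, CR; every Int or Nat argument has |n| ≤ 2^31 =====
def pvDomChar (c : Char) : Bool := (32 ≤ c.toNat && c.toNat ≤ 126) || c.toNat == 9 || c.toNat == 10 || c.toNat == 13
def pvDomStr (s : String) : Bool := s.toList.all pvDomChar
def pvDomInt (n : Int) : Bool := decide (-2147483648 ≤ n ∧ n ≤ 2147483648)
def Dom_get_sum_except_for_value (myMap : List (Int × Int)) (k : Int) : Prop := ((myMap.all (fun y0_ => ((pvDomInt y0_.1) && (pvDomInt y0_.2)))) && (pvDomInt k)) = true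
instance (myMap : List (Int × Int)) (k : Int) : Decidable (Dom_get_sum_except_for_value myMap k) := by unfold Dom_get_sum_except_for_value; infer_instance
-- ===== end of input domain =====

-- B drops A's toExclude exclusion list entirely: each key decides locally (by comparing its
-- value with its partner's, ties broken by the smaller key) whether it is its pair's winner
-- and contributes exactly then — a memoryless single pass instead of A's exclusion-list scans.

-- ===== PORT A =====
-- A iterates the dict's items keeping (result, toExclude); a key fires only if it is not
-- self-paired (k - key ≠ key) and not yet excluded; then it excludes key and k - key and
-- adds max(val, otherValue) where otherValue is the partner's value if present, else 0.
def get_sum_except_for_value (myMap : List (Int × Int)) (k : Int) : Int :=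
  let d := PySem.Dict.ofList myMap
  (d.items.foldl (fun (st : Int × List Int) (kv : Int × Int) =>
      if k - kv.1 ≠ kv.1 ∧ kv.1 ∉ st.2 then
        let otherValue : Int :=
          match d.get? (k - kv.1) with
          | some v => v
          | none => 0
        (st.1 + max kv.2 otherValue, st.2 ++ [kv.1, k - kv.1])
      else st) ((0 : Int), ([] : List Int))).1

-- ===== PORT B =====
-- one memoryless pass: a key contributes its own value iff it wins its pair (larger value,
-- ties to the smaller key); a key with absent partner contributes max(val, 0); self-paired
-- keys are skipped.  ('myMap[other]' is read under the containment guard, so the 0 default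
-- of the match is never taken — exact.)
def get_sum_except_for_value_alt (myMap : List (Int × Int)) (k : Int) : Int :=
  let d := PySem.Dict.ofList myMap
  d.items.foldl (fun (total : Int) (kv : Int × Int) =>
    if k - kv.1 = kv.1 then total
    else if d.contains (k - kv.1) = false then total + max kv.2 0
    else
      let ov : Int :=
        match d.get? (k - kv.1) with
        | some v => v
        | none => 0
      if kv.2 > ov ∨ (kv.2 = ov ∧ kv.1 < k - kv.1) then total + kv.2 else total) 0

-- ===== PRECONDITION & SPEC =====
def Spec_get_sum_except_for_value (myMap : List (Int × Int)) (k : Int) (out : Int) : Prop := out = get_sum_except_for_value_alt myMap k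
instance (myMap : List (Int × Int)) (k : Int) (out : Int) : Decidable (Spec_get_sum_except_for_value myMap k out) := by unfold Spec_get_sum_except_for_value; infer_instance

-- ===== CLAIM =====
def Claim_equal_get_sum_except_for_value : Prop := ∀ (myMap : List (Int × Int)) (k : Int), Dom_get_sum_except_for_value myMap k → Spec_get_sum_except_for_value myMap k (get_sum_except_for_value myMap k)

-- ===== LEMMAS AND PROOFS =====

-- B's per-item contribution, as a function of the dict (used only by the proofs).
def pvContrib (d : PySem.Dict Int Int) (k : Int) (key val : Int) : Int :=
  if k - key = key then 0
  else if d.contains (k - key) = false then max val 0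
  else
    let ov : Int :=
      match d.get? (k - key) with
      | some v => v
      | none => 0
    if val > ov ∨ (val = ov ∧ key < k - key) then val else 0

-- B's fold is the plain sum of the per-item contributions.
theorem pv_B_sum (d : PySem.Dict Int Int) (k : Int) :
    ∀ (L : List (Int × Int)) (total : Int),
    L.foldl (fun (total : Int) (kv : Int × Int) =>
      if k - kv.1 = kv.1 then total
      else if d.contains (k - kv.1) = false then total + max kv.2 0
      else
        let ov : Int :=
          match d.get? (k - kv.1) with
          | some v => v
          | none => 0
        if kv.2 > ov ∨ (kv.2 = ov ∧ kv.1 < k - kv.1) then total + kv.2 else total) total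
    = total + (L.map (fun p => pvContrib d k p.1 p.2)).sum := by
  intro L
  induction L with
  | nil => intro total; simp
  | cons kv L ih =>
    intro total
    simp only [List.foldl_cons, List.map_cons, List.sum_cons, ih]
    have hstep : (if k - kv.1 = kv.1 then total
        else if d.contains (k - kv.1) = false then total + max kv.2 0
        else
          let ov : Int :=
            match d.get? (k - kv.1) with
            | some v => v
            | none => 0
          if kv.2 > ov ∨ (kv.2 = ov ∧ kv.1 < k - kv.1) then total + kv.2 else total)
        = total + pvContrib d k kv.1 kv.2 := by
      simp only [pvContrib]
      split_ifs <;> ring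
    rw [hstep]; ring

-- a key absent from a list of items contributes nothing to the filtered sum
theorem pv_sum_zero (c : Int) (g : Int × Int → Int) :
    ∀ L : List (Int × Int), c ∉ L.map Prod.fst →
    (L.map (fun p => if p.1 = c then g p else 0)).sum = 0 := by
  intro L
  induction L with
  | nil => intro _; simp
  | cons p L ih =>
    intro hc
    simp only [List.map_cons, List.mem_cons, not_or] at hc ⊢
    rw [List.sum_cons, if_neg (fun h => hc.1 h.symm), ih hc.2, add_zero]

-- a key present exactly once picks out its item's contribution
theorem pv_sum_single (c vb : Int) (g : Int × Int → Int) :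
    ∀ L : List (Int × Int), (L.map Prod.fst).Nodup → (c, vb) ∈ L →
    (L.map (fun p => if p.1 = c then g p else 0)).sum = g (c, vb) := by
  intro L
  induction L with
  | nil => intro _ h; simp at h
  | cons p L ih =>
    intro hnd hmem
    simp only [List.map_cons, List.nodup_cons] at hnd
    rcases List.mem_cons.mp hmem with h | h
    · subst h
      simp only [List.map_cons, List.sum_cons]
      rw [if_pos trivial, pv_sum_zero c g L (by simpa using hnd.1), add_zero]
    · have hne : p.1 ≠ c := by
        intro he
        exact hnd.1 (he ▸ (List.mem_map.mpr ⟨(c, vb), h, rfl⟩))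
      simp only [List.map_cons, List.sum_cons]
      rw [if_neg hne, zero_add]
      exact ih hnd.2 h

-- extending the exclusion list by [a, c] removes exactly c's contribution (a absent)
theorem pv_sum_mark (te : List Int) (a c : Int) (g : Int × Int → Int) :
    ∀ L : List (Int × Int), a ∉ L.map Prod.fst →
    (L.map (fun p => if p.1 ∈ te ++ [a, c] then 0 else g p)).sum
      + (L.map (fun p => if p.1 = c ∧ c ∉ te then g p else 0)).sum
    = (L.map (fun p => if p.1 ∈ te then 0 else g p)).sum := by
  intro L
  induction L with
  | nil => intro _; simp
  | cons p L ih =>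
    intro ha
    simp only [List.map_cons, List.mem_cons, not_or] at ha ⊢
    simp only [List.sum_cons]
    have hIH := ih ha.2
    have hpa : p.1 ≠ a := fun h => ha.1 h.symm
    by_cases hte : p.1 ∈ te
    · rw [if_pos (by simp [List.mem_append, hte]), if_pos hte,
        if_neg (by rintro ⟨h1, h2⟩; exact h2 (h1 ▸ hte))]
      omega
    · by_cases hc : p.1 = c
      · rw [if_pos (by simp [List.mem_append, hc]), if_neg hte,
          if_pos ⟨hc, hc ▸ hte⟩]
        omega
      · rw [if_neg (by simp [List.mem_append, hte, hpa, hc]), if_neg hte,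
          if_neg (by rintro ⟨h1, _⟩; exact hc h1)]
        omega

-- The loop invariant: A's fold from (res, te) ends at res plus the contributions of the
-- remaining not-yet-excluded keys.
theorem pv_A_loop (d : PySem.Dict Int Int) (k : Int) :
    ∀ (L : List (Int × Int)) (res : Int) (te : List Int),
      (∀ p ∈ L, d.get? p.1 = some p.2) →
      (L.map Prod.fst).Nodup →
      (∀ y ∈ te, k - y ∈ te) →
      (∀ y ∈ te, 2 * y ≠ k) →
      (∀ x ∈ L.map Prod.fst, x ∉ te → d.contains (k - x) = true → k - x ∈ L.map Prod.fst) →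
      (L.foldl (fun (st : Int × List Int) (kv : Int × Int) =>
          if k - kv.1 ≠ kv.1 ∧ kv.1 ∉ st.2 then
            let otherValue : Int :=
              match d.get? (k - kv.1) with
              | some v => v
              | none => 0
            (st.1 + max kv.2 otherValue, st.2 ++ [kv.1, k - kv.1])
          else st) (res, te)).1
      = res + (L.map (fun p => if p.1 ∈ te then 0 else pvContrib d k p.1 p.2)).sum := by
  intro L
  induction L with
  | nil => intro res te _ _ _ _ _; simp
  | cons kv L ih =>
    intro res te hmem hnd h1 h2 h3
    obtain ⟨key, val⟩ := kv
    have hval : d.get? key = some val := hmem (key, val) (List.mem_cons_self ..)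
    simp only [List.map_cons, List.nodup_cons] at hnd
    have hkeyL : key ∉ L.map Prod.fst := hnd.1
    have hheadmem : key ∈ List.map Prod.fst ((key, val) :: L) := by
      simp
    simp only [List.foldl_cons, List.map_cons, List.sum_cons]
    by_cases hk : k - key = key
    · -- self-paired: A skips, contribution is 0
      have hkte : key ∉ te := fun h => h2 key h (by omega)
      rw [if_neg (by rintro ⟨h, _⟩; exact h hk)]
      rw [ih res te (fun p hp => hmem p (List.mem_cons_of_mem _ hp)) hnd.2 h1 h2 ?_]
      · rw [if_neg hkte]
        simp only [pvContrib, if_pos hk]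
        ring
      · intro x hx hxte hcon
        have h := h3 x (by simp only [List.map_cons, List.mem_cons]; exact Or.inr hx) hxte hcon
        simp only [List.map_cons, List.mem_cons] at h
        rcases h with h | h
        · exfalso
          have hx' : x = key := by omega
          exact hkeyL (hx' ▸ hx)
        · exact h
    · by_cases hte : key ∈ te
      · -- already excluded: A skips, the filter kills the contribution
        rw [if_neg (by rintro ⟨_, h⟩; exact h hte)]
        rw [ih res te (fun p hp => hmem p (List.mem_cons_of_mem _ hp)) hnd.2 h1 h2 ?_]
        · rw [if_pos hte]; ring
        · intro x hx hxte hcon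
          have h := h3 x (by simp only [List.map_cons, List.mem_cons]; exact Or.inr hx) hxte hcon
          simp only [List.map_cons, List.mem_cons] at h
          rcases h with h | h
          · exfalso
            have hxk : x = k - key := by omega
            exact hxte (hxk ▸ h1 key hte)
          · exact h
      · -- fresh pair: A fires
        rw [if_pos ⟨hk, hte⟩]
        have hpartner_te : k - key ∉ te := by
          intro h
          have := h1 (k - key) h
          have hkk : k - (k - key) = key := by omega
          exact hte (hkk ▸ this)
        have h1' : ∀ y ∈ te ++ [key, k - key], k - y ∈ te ++ [key, k - key] := by
          intro y hy
          simp only [List.mem_append, List.mem_cons, List.not_mem_nil, or_false] at hy ⊢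
          rcases hy with hy | hy | hy
          · exact Or.inl (h1 y hy)
          · subst hy; exact Or.inr (Or.inr rfl)
          · subst hy; exact Or.inr (Or.inl (by omega))
        have h2' : ∀ y ∈ te ++ [key, k - key], 2 * y ≠ k := by
          intro y hy
          simp only [List.mem_append, List.mem_cons, List.not_mem_nil, or_false] at hy
          rcases hy with hy | hy | hy
          · exact h2 y hy
          · subst hy; omega
          · subst hy; omega
        have h3' : ∀ x ∈ L.map Prod.fst, x ∉ te ++ [key, k - key] →
            d.contains (k - x) = true → k - x ∈ L.map Prod.fst := by
          intro x hx hxte hcon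
          simp only [List.mem_append, List.mem_cons, List.not_mem_nil, or_false, not_or] at hxte
          have h := h3 x (by simp only [List.map_cons, List.mem_cons]; exact Or.inr hx)
            hxte.1 hcon
          simp only [List.map_cons, List.mem_cons] at h
          rcases h with h | h
          · exact absurd (by omega : x = k - key) hxte.2.2
          · exact h
        rw [ih _ (te ++ [key, k - key]) (fun p hp => hmem p (List.mem_cons_of_mem _ hp))
            hnd.2 h1' h2' h3']
        rw [if_neg hte]
        have hmark := pv_sum_mark te key (k - key) (fun p => pvContrib d k p.1 p.2) L hkeyL
        have hsimp : (L.map (fun p => if p.1 = k - key ∧ (k - key) ∉ te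
            then pvContrib d k p.1 p.2 else 0))
            = L.map (fun p => if p.1 = k - key then pvContrib d k p.1 p.2 else 0) := by
          apply List.map_congr_left
          intro p _
          by_cases h : p.1 = k - key
          · rw [if_pos ⟨h, hpartner_te⟩, if_pos h]
          · rw [if_neg (by rintro ⟨h1, _⟩; exact h h1), if_neg h]
        rw [hsimp] at hmark
        simp only at hmark
        cases hcon : d.contains (k - key) with
        | false =>
          -- partner absent: otherValue = 0, no later contribution of the partner
          have hget : d.get? (k - key) = none := by
            cases hg : d.get? (k - key) with
            | none => rfl
            | some v =>
              rw [PySem.Dict.contains_eq_isSome_get?, hg] at hcon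
              simp at hcon
          have hnotin : k - key ∉ L.map Prod.fst := by
            intro h
            rcases List.mem_map.mp h with ⟨p, hp, hp1⟩
            have hg := hmem p (List.mem_cons_of_mem _ hp)
            rw [hp1, hget] at hg
            simp at hg
          rw [pv_sum_zero (k - key) (fun p => pvContrib d k p.1 p.2) L hnotin] at hmark
          have hcontrib : pvContrib d k key val = max val 0 := by
            simp [pvContrib, hk, hcon]
          have hred : (match (none : Option Int) with | some v => v | none => 0) = (0 : Int) := rfl
          rw [hget, hred, hcontrib]
          omega
        | true =>
          -- partner present: its later contribution plus key's equals the pair's max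
          obtain ⟨vb, hvb⟩ : ∃ vb, d.get? (k - key) = some vb := by
            rw [PySem.Dict.contains_eq_isSome_get?] at hcon
            exact Option.isSome_iff_exists.mp hcon
          have hpmem : (k - key, vb) ∈ L := by
            have hkeys := h3 key hheadmem hte hcon
            simp only [List.map_cons, List.mem_cons] at hkeys
            rcases hkeys with h | h
            · exact absurd h (by omega)
            · rcases List.mem_map.mp h with ⟨p, hp, hp1⟩
              have hg := hmem p (List.mem_cons_of_mem _ hp)
              rw [hp1, hvb] at hg
              obtain ⟨p1, p2⟩ := p
              injection hg with hg'
              simp only at hp1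
              rw [← hp1, hg']
              exact hp
          rw [pv_sum_single (k - key) vb (fun p => pvContrib d k p.1 p.2) L hnd.2 hpmem] at hmark
          simp only at hmark
          have hc1 : pvContrib d k key val
              = if val > vb ∨ (val = vb ∧ key < k - key) then val else 0 := by
            simp [pvContrib, hk, hcon, hvb]
          have hc2 : pvContrib d k (k - key) vb
              = if vb > val ∨ (vb = val ∧ k - key < key) then vb else 0 := by
            have hkk : k - (k - key) = key := by omega
            have hck : d.contains key = true := by
              rw [PySem.Dict.contains_eq_isSome_get?, hval]; rfl
            simp only [pvContrib, hkk]
            rw [if_neg (by omega : ¬ key = k - key), hck, hval]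
            simp
          have hred : (match some vb with | some v => v | none => 0) = vb := rfl
          rw [hvb, hred, hc1]
          rw [hc2] at hmark
          have hmc := max_choice val vb
          have hml := le_max_left val vb
          have hmr := le_max_right val vb
          have hne : ¬ key = k - key := by omega
          split_ifs with ha1 <;> split_ifs at hmark with ha2 <;> omega

-- ===== VERDICT =====
theorem get_sum_except_for_value_spec : Claim_equal_get_sum_except_for_value := by
  unfold Claim_equal_get_sum_except_for_value
  intro myMap k _
  unfold Spec_get_sum_except_for_value
  simp only [get_sum_except_for_value, get_sum_except_for_value_alt]
  set d := PySem.Dict.ofList myMap with hd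
  have hnd : d.keys.Nodup := PySem.Dict.nodup_keys_ofList myMap
  have hnd' : (d.items.map Prod.fst).Nodup := by
    simpa [PySem.Dict.keys] using hnd
  have hmem : ∀ p ∈ d.items, d.get? p.1 = some p.2 := fun p hp =>
    PySem.Dict.get?_of_mem_items _ hp hnd
  have h3 : ∀ x ∈ d.items.map Prod.fst, x ∉ ([] : List Int) →
      d.contains (k - x) = true → k - x ∈ d.items.map Prod.fst := by
    intro x _ _ hcon
    have := (PySem.Dict.contains_iff_mem_keys d (k - x)).mp hcon
    simpa [PySem.Dict.keys] using this
  have hA := pv_A_loop d k d.items 0 [] hmem hnd' (by simp) (by simp) h3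
  have hB := pv_B_sum d k d.items 0
  rw [hA, hB]
  simp
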